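-- pv_equiv track=rewrite | github.com/gustavobftorres/pool-report | services/telegram_sender.py | _truncate_caption
-- ===== SOURCE A (Python) =====
-- def _truncate_caption(caption: str, max_length: int = 1024) -> str:
--     """
--     Truncate caption to Telegram's limit, preserving structure.
--     If truncation is needed, cut insights first, then other content.
--     """
--     if len(caption) <= max_length:
--         return caption
--
--     # Try to preserve base metrics, truncate insights if present
--     if "\n\nInsights:\n" in caption:
--         base, insights_section = caption.split("\n\nInsights:\n", 1)
--         base_len = len(base) + len("\n\nInsights:\n")
--         available = max_length - base_len - 20  # Reserve for "... (truncated)"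
--
--         if available > 50:
--             # Truncate insights line by line
--             insight_lines = insights_section.split("\n")
--             truncated_insights = []
--             current_len = 0
--             for line in insight_lines:
--                 if current_len + len(line) + 1 <= available:
--                     truncated_insights.append(line)
--                     current_len += len(line) + 1
--                 else:
--                     break
--             if truncated_insights:
--                 return base + "\n\nInsights:\n" + "\n".join(truncated_insights)
--             else:
--                 return base
--         else:
--             # Not enough space for insights, remove them
--             return base
--
--     # No insights section, truncate from end
--     return caption[:max_length - 3] + "..."
-- ===== SOURCE B (Python) =====
-- def _keep_lines(lines, budget):
--     """Longest prefix of lines whose total cost (len+1 each) fits in budget,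
--     by recursion on the list with a shrinking remaining budget."""
--     if not lines:
--         return []
--     cost = len(lines[0]) + 1
--     if cost > budget:
--         return []
--     return [lines[0]] + _keep_lines(lines[1:], budget - cost)
--
--
-- def _truncate_caption(caption: str, max_length: int = 1024) -> str:
--     if len(caption) <= max_length:
--         return caption
--     marker = "\n\nInsights:\n"
--     if marker not in caption:
--         return caption[:max_length - 3] + "..."
--     base, insights = caption.split(marker, 1)
--     budget = max_length - len(base) - len(marker) - 20
--     if budget <= 50:
--         return base
--     kept = _keep_lines(insights.split("\n"), budget)
--     return base + marker + "\n".join(kept) if kept else base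
-- ===== Notes on version B (the rewrite author's own statement) =====
-- stated objective: alternative
-- what changed: A's single imperative loop with a running-total accumulator and break is replaced by a standalone recursive helper that consumes the line list with a shrinking remaining budget and builds the kept prefix by cons, with the outer guards restructured as early returns.
import Mathlib
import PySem

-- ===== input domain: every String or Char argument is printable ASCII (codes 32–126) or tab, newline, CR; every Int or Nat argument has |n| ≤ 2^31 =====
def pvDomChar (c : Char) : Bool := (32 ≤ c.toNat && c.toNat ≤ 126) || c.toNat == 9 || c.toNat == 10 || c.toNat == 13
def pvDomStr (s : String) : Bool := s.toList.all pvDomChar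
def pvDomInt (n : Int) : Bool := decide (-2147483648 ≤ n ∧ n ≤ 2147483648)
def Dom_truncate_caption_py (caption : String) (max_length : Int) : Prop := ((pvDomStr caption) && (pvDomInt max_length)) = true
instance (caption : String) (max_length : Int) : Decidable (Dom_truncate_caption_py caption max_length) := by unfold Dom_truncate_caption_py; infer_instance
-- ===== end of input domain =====

-- B replaces A's accumulate-with-break loop by a recursive helper over the line list
-- with a shrinking remaining budget (objective: alternative decomposition, same cost).

-- ===== PORT A =====
def truncate_caption_py (caption : String) (max_length : Int) : String :=
  if (PySem.Str.len caption : Int) ≤ max_length then caption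
  else if PySem.Str.isIn "\n\nInsights:\n" caption then
    -- 'base, insights_section = caption.split(sep, 1)': the isIn guard guarantees two pieces
    let parts := (PySem.Str.splitMax? caption "\n\nInsights:\n" 1).getD []
    let base := parts.getD 0 ""
    let insights_section := parts.getD 1 ""
    (let base_len : Int := (PySem.Str.len base : Int) + (PySem.Str.len "\n\nInsights:\n" : Int)
      let available : Int := max_length - base_len - 20
      if 50 < available then
        let insight_lines := (PySem.Str.split? insights_section "\n").getD []
        -- for-loop with break, ported as a fold over (truncated_insights, current_len, stopped)
        let st := insight_lines.foldl (fun (st : List String × Int × Bool) line =>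
          if st.2.2 then st
          else if st.2.1 + (PySem.Str.len line : Int) + 1 ≤ available then
            (st.1 ++ [line], st.2.1 + (PySem.Str.len line : Int) + 1, false)
          else (st.1, st.2.1, true)) ([], 0, false)
        if st.1 ≠ [] then
          base ++ "\n\nInsights:\n" ++ PySem.Str.join "\n" st.1
        else base
      else base)
  else PySem.Str.slice caption none (some (max_length - 3)) ++ "..."

-- ===== PORT B =====
-- _keep_lines: recursion on the line list, budget shrinks by each kept line's cost
def keepLines : List String → Int → List String
  | [], _ => []
  | l :: ls, budget =>
    if budget < (PySem.Str.len l : Int) + 1 then []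
    else l :: keepLines ls (budget - ((PySem.Str.len l : Int) + 1))

def truncate_caption_py_alt (caption : String) (max_length : Int) : String :=
  if (PySem.Str.len caption : Int) ≤ max_length then caption
  else
    let marker := "\n\nInsights:\n"
    if ¬ PySem.Str.isIn marker caption then
      PySem.Str.slice caption none (some (max_length - 3)) ++ "..."
    else
      -- 'base, insights = caption.split(marker, 1)': the isIn guard guarantees two pieces
      let parts := (PySem.Str.splitMax? caption marker 1).getD []
      let base := parts.getD 0 ""
      let insights := parts.getD 1 ""
      (let budget : Int := max_length - (PySem.Str.len base : Int) - (PySem.Str.len marker : Int) - 20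
        if budget ≤ 50 then base
        else
          let kept := keepLines ((PySem.Str.split? insights "\n").getD []) budget
          if kept ≠ [] then base ++ marker ++ PySem.Str.join "\n" kept else base)

-- ===== PRECONDITION & SPEC =====
def Spec_truncate_caption_py (caption : String) (max_length : Int) (out : String) : Prop := out = truncate_caption_py_alt caption max_length
instance (caption : String) (max_length : Int) (out : String) : Decidable (Spec_truncate_caption_py caption max_length out) := by unfold Spec_truncate_caption_py; infer_instance

-- ===== CLAIM (what is proved, stated in full; the proofs are below) =====
def Claim_equal_truncate_caption_py : Prop := ∀ (caption : String) (max_length : Int), Dom_truncate_caption_py caption max_length → Spec_truncate_caption_py caption max_length (truncate_caption_py caption max_length)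

-- ===== LEMMAS AND PROOFS =====

theorem pvStopped (lines : List String) (a : List String) (b : Int) (available : Int) :
    lines.foldl (fun (st : List String × Int × Bool) line =>
      if st.2.2 then st
      else if st.2.1 + (PySem.Str.len line : Int) + 1 ≤ available then
        (st.1 ++ [line], st.2.1 + (PySem.Str.len line : Int) + 1, false)
      else (st.1, st.2.1, true)) (a, b, true) = (a, b, true) := by
  induction lines with
  | nil => rfl
  | cons l ls ih => rw [List.foldl_cons]; simpa using ih

theorem pvGreedy (available : Int) (lines : List String) (acc : List String) (c : Int) :
    (lines.foldl (fun (st : List String × Int × Bool) line =>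
      if st.2.2 then st
      else if st.2.1 + (PySem.Str.len line : Int) + 1 ≤ available then
        (st.1 ++ [line], st.2.1 + (PySem.Str.len line : Int) + 1, false)
      else (st.1, st.2.1, true)) (acc, c, false)).1
    = acc ++ keepLines lines (available - c) := by
  induction lines generalizing acc c with
  | nil => simp [keepLines]
  | cons l ls ih =>
    rw [List.foldl_cons]
    by_cases h : c + (PySem.Str.len l : Int) + 1 ≤ available
    · have hstep : (if ((acc, c, false) : List String × Int × Bool).2.2 then (acc, c, false)
          else if c + (PySem.Str.len l : Int) + 1 ≤ available then
            (acc ++ [l], c + (PySem.Str.len l : Int) + 1, false)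
          else (acc, c, true)) = (acc ++ [l], c + (PySem.Str.len l : Int) + 1, false) := by
        rw [if_neg (by simp), if_pos h]
      rw [hstep, ih]
      have hfit : ¬ (available - c < (PySem.Str.len l : Int) + 1) := by omega
      rw [keepLines, if_neg hfit]
      have : available - (c + (PySem.Str.len l : Int) + 1)
           = available - c - ((PySem.Str.len l : Int) + 1) := by ring
      rw [this, List.append_assoc, List.singleton_append]
    · have hstep : (if ((acc, c, false) : List String × Int × Bool).2.2 then (acc, c, false)
          else if c + (PySem.Str.len l : Int) + 1 ≤ available then
            (acc ++ [l], c + (PySem.Str.len l : Int) + 1, false)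
          else (acc, c, true)) = (acc, c, true) := by
        rw [if_neg (by simp), if_neg h]
      rw [hstep, pvStopped]
      have hbrk : available - c < (PySem.Str.len l : Int) + 1 := by omega
      rw [keepLines, if_pos hbrk, List.append_nil]

-- ===== VERDICT (by name: the statement is the Claim_ definition above) =====
theorem truncate_caption_py_spec : Claim_equal_truncate_caption_py := by
  intro caption max_length _hdom
  unfold Spec_truncate_caption_py truncate_caption_py truncate_caption_py_alt
  by_cases h1 : (PySem.Str.len caption : Int) ≤ max_length
  · simp only [if_pos h1]
  · simp only [if_neg h1]
    by_cases h2 : PySem.Str.isIn "\n\nInsights:\n" caption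
    · rw [if_pos h2, if_neg (show ¬¬ PySem.Str.isIn "\n\nInsights:\n" caption from not_not_intro h2)]
      set base := ((PySem.Str.splitMax? caption "\n\nInsights:\n" 1).getD []).getD 0 "" with hbase
      set insights := ((PySem.Str.splitMax? caption "\n\nInsights:\n" 1).getD []).getD 1 "" with hins
      set lines := (PySem.Str.split? insights "\n").getD [] with hlines
      by_cases h3 : (50 : Int) < max_length - ((PySem.Str.len base : Int) + (PySem.Str.len "\n\nInsights:\n" : Int)) - 20
      · rw [if_pos h3, if_neg (show ¬(max_length - (PySem.Str.len base : Int) - (PySem.Str.len "\n\nInsights:\n" : Int) - 20 ≤ 50) from by omega)]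
        simp only [pvGreedy, List.nil_append]
        rw [show max_length - ((PySem.Str.len base : Int) + (PySem.Str.len "\n\nInsights:\n" : Int)) - 20 - 0
            = max_length - (PySem.Str.len base : Int) - (PySem.Str.len "\n\nInsights:\n" : Int) - 20 from by ring]
      · rw [if_neg h3, if_pos (show max_length - (PySem.Str.len base : Int) - (PySem.Str.len "\n\nInsights:\n" : Int) - 20 ≤ 50 from by omega)]
    · rw [if_neg h2, if_pos (show ¬ PySem.Str.isIn "\n\nInsights:\n" caption from h2)]
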